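-- pv_equiv track=rewrite | github.com/DavidLeifer/OpenSourceDocument | ExerciseStatisticsVersions/exercise_modules/202505060828-exercise_module.py | filter_stop
-- ===== SOURCE A (Python) =====
-- def filter_stop(column):
--   filtered_column = []
--   for i in column:
--     if 'Walked' in i:
--       filtered_column.append("Walk")
--     elif 'Juggling' in i:
--       filtered_column.append("Juggle")
--     elif 'Driving' in i:
--       filtered_column.append("Drive")
--
--     # english hard idk
--     elif 'Reading' in i:
--       filtered_column.append("Read")
--     elif 'Writing' in i:
--       filtered_column.append("Write")
--     elif 'No juggling' in i:
--       filtered_column.append("No juggling")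
--     elif 'Running' in i:
--       filtered_column.append("Run")
--     elif 'Hiking' in i:
--       filtered_column.append("Hike")
--     elif 'Rested' in i:
--       filtered_column.append("Rest")
--     elif 'Stretched' in i:
--       filtered_column.append("Stretch")
--
--     elif i == 'Lifts':
--       # Could append since this is hard coded but I wanted to test.
--       verb_less = i.replace("s", "")
--       # verb_less = self.c_replace(i, "s", "")
--       filtered_column.append(verb_less)
--     elif 'ing' in i:
--       verb_less = i.replace("ing", "")
--       # verb_less = self.c_replace(i, "ing", "")
--       filtered_column.append(verb_less)
--     else:
--       filtered_column.append(i)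
--   return filtered_column
-- ===== SOURCE B (Python) =====
-- RULES = [
--     ("Walked", "Walk"),
--     ("Juggling", "Juggle"),
--     ("Driving", "Drive"),
--     ("Reading", "Read"),
--     ("Writing", "Write"),
--     ("No juggling", "No juggling"),
--     ("Running", "Run"),
--     ("Hiking", "Hike"),
--     ("Rested", "Rest"),
--     ("Stretched", "Stretch"),
-- ]
--
-- def filter_stop(column):
--     # Rule-major staged sweeps: fill a parallel slot array one rule at a time,
--     # then a final pass resolves the still-empty slots with the tail cases.
--     out = [None] * len(column)
--     for sub, lab in RULES:
--         for k, i in enumerate(column):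
--             if out[k] is None and sub in i:
--                 out[k] = lab
--     for k, i in enumerate(column):
--         if out[k] is None:
--             if i == 'Lifts':
--                 out[k] = i.replace('s', '')
--             elif 'ing' in i:
--                 out[k] = i.replace('ing', '')
--             else:
--                 out[k] = i
--     return out
-- ===== Notes on version B (the rewrite author's own statement) =====
-- stated objective: alternative
-- what changed: Replaces the per-element elif chain with rule-major staged sweeps: a parallel slot array is filled one (substring,label) rule at a time across the whole column, then one final pass resolves still-empty slots with the Lifts/'ing'/identity tail cases.
import Mathlib
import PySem

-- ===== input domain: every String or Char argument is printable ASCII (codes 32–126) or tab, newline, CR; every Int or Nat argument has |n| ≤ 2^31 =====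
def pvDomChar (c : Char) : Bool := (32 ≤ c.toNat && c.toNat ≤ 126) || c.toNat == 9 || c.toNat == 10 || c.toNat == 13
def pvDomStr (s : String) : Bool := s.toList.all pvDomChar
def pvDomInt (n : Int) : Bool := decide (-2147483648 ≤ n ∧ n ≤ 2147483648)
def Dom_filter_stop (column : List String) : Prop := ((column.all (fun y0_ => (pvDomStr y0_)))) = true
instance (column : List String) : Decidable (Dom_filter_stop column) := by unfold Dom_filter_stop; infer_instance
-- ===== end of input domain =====

-- B replaces A's per-element elif chain with rule-major staged sweeps over a parallel
-- slot array, plus a final pass for the tail cases (alternative decomposition; same cost).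


-- ===== PORT A =====
def pvStepA (filtered_column : List String) (i : String) : List String :=
    if PySem.Str.isIn "Walked" i then filtered_column ++ ["Walk"]
    else if PySem.Str.isIn "Juggling" i then filtered_column ++ ["Juggle"]
    else if PySem.Str.isIn "Driving" i then filtered_column ++ ["Drive"]
    else if PySem.Str.isIn "Reading" i then filtered_column ++ ["Read"]
    else if PySem.Str.isIn "Writing" i then filtered_column ++ ["Write"]
    else if PySem.Str.isIn "No juggling" i then filtered_column ++ ["No juggling"]
    else if PySem.Str.isIn "Running" i then filtered_column ++ ["Run"]
    else if PySem.Str.isIn "Hiking" i then filtered_column ++ ["Hike"]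
    else if PySem.Str.isIn "Rested" i then filtered_column ++ ["Rest"]
    else if PySem.Str.isIn "Stretched" i then filtered_column ++ ["Stretch"]
    else if i == "Lifts" then filtered_column ++ [PySem.Str.replace i "s" ""]
    else if PySem.Str.isIn "ing" i then filtered_column ++ [PySem.Str.replace i "ing" ""]
    else filtered_column ++ [i]

def filter_stop (column : List String) : List String :=
  column.foldl pvStepA []

-- ===== PORT B =====
def pvRules : List (String × String) :=
  [("Walked", "Walk"), ("Juggling", "Juggle"), ("Driving", "Drive"),
   ("Reading", "Read"), ("Writing", "Write"), ("No juggling", "No juggling"),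
   ("Running", "Run"), ("Hiking", "Hike"), ("Rested", "Rest"), ("Stretched", "Stretch")]

-- one rule-major sweep: fill every still-empty slot whose element contains sub
def pvApplyRule (sub lab : String) (column : List String) (out : List (Option String)) :
    List (Option String) :=
  List.zipWith (fun i o => if o.isNone && PySem.Str.isIn sub i then some lab else o) column out

def pvSweep (rules : List (String × String)) (column : List String)
    (out : List (Option String)) : List (Option String) :=
  rules.foldl (fun st r => pvApplyRule r.1 r.2 column st) out

-- final pass: resolve still-empty slots with the tail cases
def pvFinish (i : String) (o : Option String) : String :=
  match o with
  | some l => l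
  | none =>
      if i == "Lifts" then PySem.Str.replace i "s" ""
      else if PySem.Str.isIn "ing" i then PySem.Str.replace i "ing" ""
      else i

def filter_stop_alt (column : List String) : List String :=
  List.zipWith pvFinish column (pvSweep pvRules column (column.map (fun _ => none)))

-- ===== PRECONDITION & SPEC =====
def Spec_filter_stop (column : List String) (out : List String) : Prop := out = filter_stop_alt column
instance (column : List String) (out : List String) : Decidable (Spec_filter_stop column out) := by unfold Spec_filter_stop; infer_instance

-- ===== CLAIM (what is proved, stated in full; the proofs are below) =====
def Claim_equal_filter_stop : Prop := ∀ (column : List String), Dom_filter_stop column → Spec_filter_stop column (filter_stop column)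

-- ===== LEMMAS AND PROOFS =====
-- per-element residual of one rule step
def pvRuleStep (i : String) (o : Option String) (r : String × String) : Option String :=
  if o.isNone && PySem.Str.isIn r.1 i then some r.2 else o

theorem zipWith_map_right_self {α β γ : Type} (f : α → β → γ) (g : α → β) (l : List α) :
    List.zipWith f l (l.map g) = l.map (fun i => f i (g i)) := by
  induction l with
  | nil => rfl
  | cons a t ih => simp [ih]

theorem sweep_map (rules : List (String × String)) (column : List String)
    (g : String → Option String) :
    pvSweep rules column (column.map g) =
      column.map (fun i => rules.foldl (pvRuleStep i) (g i)) := by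
  induction rules generalizing g with
  | nil => simp [pvSweep]
  | cons r rs ih =>
      have h1 : pvApplyRule r.1 r.2 column (column.map g) =
          column.map (fun i => pvRuleStep i (g i) r) := by
        unfold pvApplyRule pvRuleStep
        exact zipWith_map_right_self _ g column
      show pvSweep rs column (pvApplyRule r.1 r.2 column (column.map g)) = _
      rw [h1, ih (fun i => pvRuleStep i (g i) r)]
      simp [List.foldl]

-- per element, A's branch chain equals B's (sweep-then-finish) residual
theorem pvStepA_eq (acc : List String) (i : String) :
    pvStepA acc i = acc ++ [pvFinish i (pvRules.foldl (pvRuleStep i) none)] := by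
  unfold pvStepA
  by_cases h1 : PySem.Str.isIn "Walked" i = true
  · simp at h1
    simp [pvRules, pvRuleStep, pvFinish, h1]
  rw [if_neg h1]
  by_cases h2 : PySem.Str.isIn "Juggling" i = true
  · simp at h1 h2
    simp [pvRules, pvRuleStep, pvFinish, h1, h2]
  rw [if_neg h2]
  by_cases h3 : PySem.Str.isIn "Driving" i = true
  · simp at h1 h2 h3
    simp [pvRules, pvRuleStep, pvFinish, h1, h2, h3]
  rw [if_neg h3]
  by_cases h4 : PySem.Str.isIn "Reading" i = true
  · simp at h1 h2 h3 h4
    simp [pvRules, pvRuleStep, pvFinish, h1, h2, h3, h4]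
  rw [if_neg h4]
  by_cases h5 : PySem.Str.isIn "Writing" i = true
  · simp at h1 h2 h3 h4 h5
    simp [pvRules, pvRuleStep, pvFinish, h1, h2, h3, h4, h5]
  rw [if_neg h5]
  by_cases h6 : PySem.Str.isIn "No juggling" i = true
  · simp at h1 h2 h3 h4 h5 h6
    simp [pvRules, pvRuleStep, pvFinish, h1, h2, h3, h4, h5, h6]
  rw [if_neg h6]
  by_cases h7 : PySem.Str.isIn "Running" i = true
  · simp at h1 h2 h3 h4 h5 h6 h7
    simp [pvRules, pvRuleStep, pvFinish, h1, h2, h3, h4, h5, h6, h7]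
  rw [if_neg h7]
  by_cases h8 : PySem.Str.isIn "Hiking" i = true
  · simp at h1 h2 h3 h4 h5 h6 h7 h8
    simp [pvRules, pvRuleStep, pvFinish, h1, h2, h3, h4, h5, h6, h7, h8]
  rw [if_neg h8]
  by_cases h9 : PySem.Str.isIn "Rested" i = true
  · simp at h1 h2 h3 h4 h5 h6 h7 h8 h9
    simp [pvRules, pvRuleStep, pvFinish, h1, h2, h3, h4, h5, h6, h7, h8, h9]
  rw [if_neg h9]
  by_cases h10 : PySem.Str.isIn "Stretched" i = true
  · simp at h1 h2 h3 h4 h5 h6 h7 h8 h9 h10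
    simp [pvRules, pvRuleStep, pvFinish, h1, h2, h3, h4, h5, h6, h7, h8, h9, h10]
  rw [if_neg h10]
  simp at h1 h2 h3 h4 h5 h6 h7 h8 h9 h10
  simp [pvRules, pvRuleStep, pvFinish, h1, h2, h3, h4, h5, h6, h7, h8, h9, h10]
  split_ifs <;> rfl

theorem alt_eq_map (column : List String) :
    filter_stop_alt column =
      column.map (fun i => pvFinish i (pvRules.foldl (pvRuleStep i) none)) := by
  unfold filter_stop_alt
  rw [sweep_map pvRules column (fun _ => none)]
  exact zipWith_map_right_self pvFinish _ column

-- ===== VERDICT (by name: the statement is the Claim_ definition above) =====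
theorem filter_stop_spec : Claim_equal_filter_stop := by
  intro column _
  unfold Spec_filter_stop filter_stop
  rw [alt_eq_map]
  simp only [show pvStepA = fun acc i =>
      acc ++ [pvFinish i (pvRules.foldl (pvRuleStep i) none)] from
    funext fun a => funext fun i => pvStepA_eq a i]
  exact (PySem.List.foldl_append_singleton_eq_map _ column []).trans (by simp)
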